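-- pv_equiv track=rewrite | github.com/JHeeKimm/Algorithm | 프로그래머스/1/12917. 문자열 내림차순으로 배치하기/문자열 내림차순으로 배치하기.py | solution
-- ===== SOURCE A (Python) =====
-- def solution(s):
--     sorted_str = sorted(s, reverse=True)
--     lower = ''
--     upper = ''
--     for char in sorted_str:
--         if char.islower():
--             lower += char
--         else: upper += char
--     return lower + upper
-- ===== SOURCE B (Python) =====
-- def solution(s):
--     low = sorted((c for c in s if c.islower()), reverse=True)
--     rest = sorted((c for c in s if not c.islower()), reverse=True)
--     return ''.join(low) + ''.join(rest)
-- ===== Notes on version B (the rewrite author's own statement) =====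
-- stated objective: alternative
-- what changed: B partitions the characters into lowercase and non-lowercase first and sorts each group descending independently, instead of A's single full sort followed by an accumulator loop that splits the sorted string.
import Mathlib
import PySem

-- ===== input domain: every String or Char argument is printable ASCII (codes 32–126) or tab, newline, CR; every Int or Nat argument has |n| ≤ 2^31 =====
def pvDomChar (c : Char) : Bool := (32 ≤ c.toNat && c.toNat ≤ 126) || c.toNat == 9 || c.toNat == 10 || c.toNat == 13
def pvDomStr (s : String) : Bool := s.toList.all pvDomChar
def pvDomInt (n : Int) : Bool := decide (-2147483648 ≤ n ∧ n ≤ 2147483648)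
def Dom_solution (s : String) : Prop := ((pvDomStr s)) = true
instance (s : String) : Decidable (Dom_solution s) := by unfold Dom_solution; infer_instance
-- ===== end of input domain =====

-- B partitions into lowercase / non-lowercase first and sorts each group descending,
-- instead of A's single full descending sort followed by a splitting accumulator loop. Same cost (alternative).

-- ===== PORT A =====
-- A: sorted_str = sorted(s, reverse=True); loop accumulating lower/upper; return lower + upper
def solution (s : String) : String :=
  let sortedStr := PySem.List.sorted s.toList (fun c => c) true
  let res := sortedStr.foldl
    (fun (acc : List Char × List Char) c =>
      if PySem.Chars.islower c then (acc.1 ++ [c], acc.2) else (acc.1, acc.2 ++ [c]))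
    ([], [])
  String.mk (res.1 ++ res.2)

-- ===== PORT B =====
-- B: sort the lowercase chars and the remaining chars independently, then concatenate
def solution_alt (s : String) : String :=
  let low := PySem.List.sorted (s.toList.filter (fun c => PySem.Chars.islower c)) (fun c => c) true
  let rest := PySem.List.sorted (s.toList.filter (fun c => !PySem.Chars.islower c)) (fun c => c) true
  String.mk (low ++ rest)

-- ===== PRECONDITION & SPEC =====
def Spec_solution (s : String) (out : String) : Prop := out = solution_alt s
instance (s : String) (out : String) : Decidable (Spec_solution s out) := by unfold Spec_solution; infer_instance

-- ===== CLAIM (what is proved, stated in full; the proofs are below) =====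
def Claim_equal_solution : Prop := ∀ (s : String), Dom_solution s → Spec_solution s (solution s)

-- ===== LEMMAS AND PROOFS =====

-- A's partition loop: the pair accumulator collects the p-chars and the ¬p-chars in order.
theorem pv_foldl_partition (p : Char → Bool) (l : List Char) (a b : List Char) :
    l.foldl (fun (acc : List Char × List Char) c =>
        if p c then (acc.1 ++ [c], acc.2) else (acc.1, acc.2 ++ [c])) (a, b)
      = (a ++ l.filter p, b ++ l.filter (fun c => !p c)) := by
  induction l generalizing a b with
  | nil => simp
  | cons x xs ih =>
    by_cases h : p x = true <;> simp [h, ih]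

-- Filtering a stable descending sort equals sorting the filtered list descending.
theorem pv_filter_sorted_rev (p : Char → Bool) (xs : List Char) :
    (PySem.List.sorted xs (fun c => c) true).filter p
      = PySem.List.sorted (xs.filter p) (fun c => c) true :=
  List.Perm.eq_of_pairwise
    (fun _ _ _ _ h1 h2 => le_antisymm h2 h1)
    (List.Pairwise.filter p (PySem.List.sorted_pairwise_rev xs (fun c => c)))
    (PySem.List.sorted_pairwise_rev (xs.filter p) (fun c => c))
    (((PySem.List.sorted_perm xs (fun c => c) true).filter p).trans
      ((PySem.List.sorted_perm (xs.filter p) (fun c => c) true).symm))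

-- ===== VERDICT (by name: the statement is the Claim_ definition above) =====
theorem solution_spec : Claim_equal_solution := by
  intro s _
  simp only [Spec_solution, solution, solution_alt]
  rw [pv_foldl_partition]
  simp [pv_filter_sorted_rev]
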